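-- pv_equiv track=rewrite | github.com/shubh-array/pydantic-agents | .cursor/hooks/lib/shell_policy.py | _argv_has_recursive_and_force
-- ===== SOURCE A (Python) =====
-- from typing import Any, Iterable, Mapping, Sequence
--
-- def _token_has_rm_recursive_and_force(tok: str) -> bool:
--     if not tok.startswith("-") or tok.startswith("--"):
--         return False
--     flags = tok[1:]
--     has_r = any(c in flags for c in "rR")
--     has_f = "f" in flags
--     return has_r and has_f
--
-- def _argv_has_recursive_and_force(argv: Sequence[str]) -> bool:
--     """True if *argv* (one command's tokens after the executable) includes both recursive and force rm flags."""
--     recursive = False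
--     force = False
--     for arg in argv:
--         if arg in ("--recursive", "-r", "-R"):
--             recursive = True
--         elif arg == "--force" or arg == "-f":
--             force = True
--         elif arg.startswith("--recursive="):
--             recursive = True
--         elif arg.startswith("--force="):
--             force = True
--         elif arg.startswith("-") and not arg.startswith("--"):
--             body = arg[1:]
--             if any(c in body for c in "rR"):
--                 recursive = True
--             if "f" in body:
--                 force = True
--             if _token_has_rm_recursive_and_force(arg):
--                 recursive = True
--                 force = True
--     return recursive and force
-- ===== SOURCE B (Python) =====
-- from typing import Sequence
--
--
-- def _is_recursive_flag(tok: str) -> bool: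
--     if tok in ("--recursive", "-r", "-R") or tok.startswith("--recursive="):
--         return True
--     return tok.startswith("-") and not tok.startswith("--") and any(c in tok[1:] for c in "rR")
--
--
-- def _is_force_flag(tok: str) -> bool:
--     if tok in ("--force", "-f") or tok.startswith("--force="):
--         return True
--     return tok.startswith("-") and not tok.startswith("--") and "f" in tok[1:]
--
--
-- def _argv_has_recursive_and_force(argv: Sequence[str]) -> bool:
--     return any(_is_recursive_flag(t) for t in argv) and any(_is_force_flag(t) for t in argv)
-- ===== Notes on version B (the rewrite author's own statement) =====
-- stated objective: simpler
-- what changed: Replaced A's single elif-chained loop threading a (recursive, force) accumulator pair (plus the redundant combined-flag helper) by two independent pure per-token predicates combined with any() reductions over argv.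
import Mathlib
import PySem

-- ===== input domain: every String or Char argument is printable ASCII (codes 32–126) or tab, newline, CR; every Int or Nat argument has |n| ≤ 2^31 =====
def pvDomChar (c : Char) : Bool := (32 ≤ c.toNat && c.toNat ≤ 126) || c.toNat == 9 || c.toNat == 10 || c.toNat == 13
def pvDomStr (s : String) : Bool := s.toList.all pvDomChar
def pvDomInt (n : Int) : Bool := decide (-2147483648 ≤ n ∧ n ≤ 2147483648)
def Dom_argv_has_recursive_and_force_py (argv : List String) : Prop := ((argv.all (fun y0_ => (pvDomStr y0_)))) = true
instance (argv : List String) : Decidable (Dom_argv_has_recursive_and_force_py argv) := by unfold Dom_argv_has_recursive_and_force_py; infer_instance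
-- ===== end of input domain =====

-- B replaces A's single accumulator-threaded elif loop by two independent per-token
-- predicates combined with any(); objective: simpler (same O(n) cost).

-- ===== PORT A =====
-- _token_has_rm_recursive_and_force
def pvTokenHasRmRF (tok : String) : Bool :=
  if !(PySem.Str.startswith tok "-") || PySem.Str.startswith tok "--" then false
  else
    let flags := PySem.List.slice tok.toList (some 1) none
    let hasR := "rR".toList.any (fun c => PySem.Chars.isIn [c] flags)
    let hasF := PySem.Chars.isIn "f".toList flags
    hasR && hasF

def argv_has_recursive_and_force_py (argv : List String) : Bool :=
  let st := argv.foldl (fun (st : Bool × Bool) arg =>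
    if arg == "--recursive" || arg == "-r" || arg == "-R" then
      (true, st.2)
    else if arg == "--force" || arg == "-f" then
      (st.1, true)
    else if PySem.Str.startswith arg "--recursive=" then
      (true, st.2)
    else if PySem.Str.startswith arg "--force=" then
      (st.1, true)
    else if PySem.Str.startswith arg "-" && !(PySem.Str.startswith arg "--") then
      let body := PySem.List.slice arg.toList (some 1) none
      let st1 : Bool × Bool :=
        (if "rR".toList.any (fun c => PySem.Chars.isIn [c] body) then (true, st.2) else st)
      let st2 : Bool × Bool :=
        (if PySem.Chars.isIn "f".toList body then (st1.1, true) else st1)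
      if pvTokenHasRmRF arg then (true, true) else st2
    else st) (false, false)
  st.1 && st.2

-- ===== PORT B =====
def pvIsRecursiveFlag (tok : String) : Bool :=
  if tok == "--recursive" || tok == "-r" || tok == "-R" || PySem.Str.startswith tok "--recursive=" then
    true
  else
    PySem.Str.startswith tok "-" && !(PySem.Str.startswith tok "--") &&
      "rR".toList.any (fun c => PySem.Chars.isIn [c] (PySem.List.slice tok.toList (some 1) none))

def pvIsForceFlag (tok : String) : Bool :=
  if tok == "--force" || tok == "-f" || PySem.Str.startswith tok "--force=" then
    true
  else
    PySem.Str.startswith tok "-" && !(PySem.Str.startswith tok "--") &&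
      PySem.Chars.isIn "f".toList (PySem.List.slice tok.toList (some 1) none)

def argv_has_recursive_and_force_py_alt (argv : List String) : Bool :=
  argv.any pvIsRecursiveFlag && argv.any pvIsForceFlag

-- ===== PRECONDITION & SPEC =====
def Spec_argv_has_recursive_and_force_py (argv : List String) (out : Bool) : Prop := out = argv_has_recursive_and_force_py_alt argv
instance (argv : List String) (out : Bool) : Decidable (Spec_argv_has_recursive_and_force_py argv out) := by unfold Spec_argv_has_recursive_and_force_py; infer_instance

-- ===== CLAIM (what is proved, stated in full; the proofs are below) =====
def Claim_equal_argv_has_recursive_and_force_py : Prop := ∀ (argv : List String), Dom_argv_has_recursive_and_force_py argv → Spec_argv_has_recursive_and_force_py argv (argv_has_recursive_and_force_py argv)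

-- ===== LEMMAS AND PROOFS =====

-- prefix facts used by the case analysis
lemma pvSw_mono {arg p q : String} (h : PySem.Str.startswith arg p = true)
    (hq : q.toList <+: p.toList) : PySem.Str.startswith arg q = true := by
  simp only [PySem.Str.startswith_eq, PySem.Chars.startswith_iff] at h ⊢
  exact hq.trans h

lemma pvSw_excl {arg : String} (h : PySem.Str.startswith arg "--recursive=" = true) :
    PySem.Str.startswith arg "--force=" = false := by
  by_contra hc
  rw [Bool.not_eq_false] at hc
  simp only [PySem.Str.startswith_eq, PySem.Chars.startswith_iff] at h hc
  rcases List.prefix_or_prefix_of_prefix h hc with hp | hp <;> revert hp <;> decide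

-- A's loop body updates the pair exactly by or-ing in B's two per-token predicates.
lemma pvStep_eq (st : Bool × Bool) (arg : String) :
    (if arg == "--recursive" || arg == "-r" || arg == "-R" then
      (true, st.2)
    else if arg == "--force" || arg == "-f" then
      (st.1, true)
    else if PySem.Str.startswith arg "--recursive=" then
      (true, st.2)
    else if PySem.Str.startswith arg "--force=" then
      (st.1, true)
    else if PySem.Str.startswith arg "-" && !(PySem.Str.startswith arg "--") then
      let body := PySem.List.slice arg.toList (some 1) none
      let st1 : Bool × Bool :=
        (if "rR".toList.any (fun c => PySem.Chars.isIn [c] body) then (true, st.2) else st)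
      let st2 : Bool × Bool :=
        (if PySem.Chars.isIn "f".toList body then (st1.1, true) else st1)
      if pvTokenHasRmRF arg then (true, true) else st2
    else st) = (st.1 || pvIsRecursiveFlag arg, st.2 || pvIsForceFlag arg) := by
  obtain ⟨a, b⟩ := st
  by_cases h1 : (arg == "--recursive" || arg == "-r" || arg == "-R") = true
  · rw [if_pos h1]
    simp only [Bool.or_eq_true, beq_iff_eq] at h1
    rcases h1 with (h | h) | h <;> subst h <;> cases a <;> cases b <;> decide
  · rw [if_neg h1]
    by_cases h2 : (arg == "--force" || arg == "-f") = true
    · rw [if_pos h2]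
      simp only [Bool.or_eq_true, beq_iff_eq] at h2
      rcases h2 with h | h <;> subst h <;> cases a <;> cases b <;> decide
    · rw [if_neg h2]
      simp only [Bool.or_eq_true, beq_iff_eq, not_or] at h1 h2
      by_cases h3 : PySem.Str.startswith arg "--recursive=" = true
      · rw [if_pos h3]
        have hf := pvSw_excl h3
        have hdd := pvSw_mono (q := "--") h3 (by decide)
        simp at h3 hf hdd
        simp [pvIsRecursiveFlag, pvIsForceFlag, h3, hf, hdd, h2.1, h2.2]
      · rw [if_neg h3]
        rw [Bool.not_eq_true] at h3
        by_cases h4 : PySem.Str.startswith arg "--force=" = true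
        · rw [if_pos h4]
          have hdd := pvSw_mono (q := "--") h4 (by decide)
          simp at h3 h4 hdd
          simp [pvIsRecursiveFlag, pvIsForceFlag, h3, h4, hdd, h1.1.1, h1.1.2, h1.2]
        · rw [if_neg h4]
          rw [Bool.not_eq_true] at h4
          by_cases h5 : (PySem.Str.startswith arg "-" && !(PySem.Str.startswith arg "--")) = true
          · rw [if_pos h5]
            have hd : PySem.Str.startswith arg "-" = true := (Bool.and_eq_true .. |>.mp h5).1
            have hnd : PySem.Str.startswith arg "--" = false := by
              have := (Bool.and_eq_true .. |>.mp h5).2; simpa using this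
            simp at h3 h4 hd hnd
            simp [pvTokenHasRmRF, pvIsRecursiveFlag, pvIsForceFlag, h3, h4, hd, hnd,
              h1.1.1, h1.1.2, h1.2, h2.1, h2.2]
            split_ifs <;> simp_all
          · rw [if_neg h5]
            rw [Bool.not_eq_true] at h5
            simp at h3 h4 h5
            simp [pvIsRecursiveFlag, pvIsForceFlag, h3, h4, h1.1.1, h1.1.2, h1.2, h2.1, h2.2]
            cases hx : PySem.Chars.startswith arg.toList ['-'] <;>
              cases hy : PySem.Chars.startswith arg.toList ['-', '-'] <;> simp_all

lemma pvFoldl_eq (argv : List String) (st : Bool × Bool) :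
    argv.foldl (fun (st : Bool × Bool) arg =>
      if arg == "--recursive" || arg == "-r" || arg == "-R" then
        (true, st.2)
      else if arg == "--force" || arg == "-f" then
        (st.1, true)
      else if PySem.Str.startswith arg "--recursive=" then
        (true, st.2)
      else if PySem.Str.startswith arg "--force=" then
        (st.1, true)
      else if PySem.Str.startswith arg "-" && !(PySem.Str.startswith arg "--") then
        let body := PySem.List.slice arg.toList (some 1) none
        let st1 : Bool × Bool :=
          (if "rR".toList.any (fun c => PySem.Chars.isIn [c] body) then (true, st.2) else st)
        let st2 : Bool × Bool :=
          (if PySem.Chars.isIn "f".toList body then (st1.1, true) else st1)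
        if pvTokenHasRmRF arg then (true, true) else st2
      else st) st
    = (st.1 || argv.any pvIsRecursiveFlag, st.2 || argv.any pvIsForceFlag) := by
  induction argv generalizing st with
  | nil => simp
  | cons a l ih =>
    simp only [List.foldl_cons, List.any_cons]
    rw [pvStep_eq, ih]
    simp [Bool.or_assoc]

-- ===== VERDICT (by name: the statement is the Claim_ definition above) =====
theorem argv_has_recursive_and_force_py_spec : Claim_equal_argv_has_recursive_and_force_py := by
  intro argv _
  show _ = _
  unfold argv_has_recursive_and_force_py argv_has_recursive_and_force_py_alt
  rw [pvFoldl_eq]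
  simp
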